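-- pv_equiv track=rewrite | github.com/georgesldk/schema_discovery_on_property_graphs_using_LLMs | Zmarselo/src/pg_schema_llm/pipeline/extract_gt.py | derive_node_name
-- ===== SOURCE A (Python) =====
-- def derive_node_name(type_name, labels, valid_labels=None):
--     """
--     Derive a canonical node type name from PG-Schema type/label metadata.
--
--     This function selects a stable node name using dataset-agnostic
--     heuristics over available labels. When a validation set is provided,
--     candidates may be restricted only if a safe intersection exists.
--
--     Args:
--         type_name (str): Node type identifier from the PG-Schema definition.
--         labels (List[str]): Candidate labels associated with the node type.
--         valid_labels (Optional[Set[str]]): Optional allowed label set used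
--             as a safety filter when an intersection exists.
--
--     Returns:
--         str: Derived canonical node name used in the extracted schema.
--     """
--
--     # 1. Validation Filter (Safety Net)
--     # Only restrict candidates if we find a valid intersection.
--     # This prevents breaking if the user uploads LDBC labels for MB6.
--     candidates = labels
--     if valid_labels:
--         intersection = [l for l in labels if l in valid_labels]
--         if intersection:
--             candidates = intersection
--
--     tn = type_name.lower()
--
--     # 2. Separation: Clean (Alphanumeric) vs Dirty (Underscores)
--     clean = [l for l in candidates if l.isalnum()]
--     dirty = [l for l in candidates if not l.isalnum()]
--
--     # 3. Sort by Length Descending (Catch 'SynapseSet' before 'Synapse')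
--     clean.sort(key=len, reverse=True)
--     dirty.sort(key=len, reverse=True)
--
--     def check_strategies(lbl_list):
--         # Pass 1: Middle Token (_{label}_)
--         # Strongest signal: Matches 'Neuron' in '..._Neuron_...'
--         for l in lbl_list:
--             if f"_{l.lower()}_" in tn:
--                 return l
--
--         # Pass 2: Boundary Token (_{label} or {label}_)
--         # Matches 'Segment' in '..._Segment'
--         for l in lbl_list:
--             if tn.startswith(f"{l.lower()}_") or tn.endswith(f"_{l.lower()}"):
--                 return l
--
--         # Pass 3: Suffix Match (Standard)
--         # Matches 'Comment' in 'CommentType'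
--         for l in lbl_list:
--              if tn.endswith(l.lower()) or tn.endswith(f"{l.lower()}type"):
--                  return l
--         return None
--
--     # Priority 1: Check Clean Labels
--     res = check_strategies(clean)
--     if res: return res
--
--     # Priority 2: Check Dirty Labels
--     res = check_strategies(dirty)
--     if res: return res
--
--     # Fallback
--     return candidates[0] if candidates else type_name
-- ===== SOURCE B (Python) =====
-- def derive_node_name(type_name, labels, valid_labels=None):
--     # Same validation filter as the spec requires.
--     candidates = labels
--     if valid_labels:
--         intersection = [l for l in labels if l in valid_labels]
--         if intersection:
--             candidates = intersection
--
--     tn = type_name.lower()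
--
--     # One partition pass instead of two comprehensions.
--     clean, dirty = [], []
--     for l in candidates:
--         (clean if l.isalnum() else dirty).append(l)
--
--     def tier(l):
--         # Match strength of a single label: 1 strongest .. 4 no match.
--         low = l.lower()
--         if "_" + low + "_" in tn:
--             return 1
--         if tn.startswith(low + "_") or tn.endswith("_" + low):
--             return 2
--         if tn.endswith(low) or tn.endswith(low + "type"):
--             return 3
--         return 4
--
--     def pick(lst):
--         # Single scan over the length-desc-sorted labels keeping the best
--         # (lowest) tier; ties go to the earlier element of the sorted order.
--         best, best_tier = None, 4
--         for l in sorted(lst, key=len, reverse=True):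
--             t = tier(l)
--             if t < best_tier:
--                 best, best_tier = l, t
--         return best
--
--     res = pick(clean) or pick(dirty)
--     if res:
--         return res
--     return candidates[0] if candidates else type_name
-- ===== Notes on version B (the rewrite author's own statement) =====
-- stated objective: alternative
-- what changed: Replaces check_strategies' three sequential early-return scans per label group with one single scan that assigns each label a match tier (1 middle token, 2 boundary, 3 suffix) and keeps the lowest-tier label, plus one partition pass instead of two filter comprehensions; Python-or combines the clean/dirty picks.
import Mathlib
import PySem

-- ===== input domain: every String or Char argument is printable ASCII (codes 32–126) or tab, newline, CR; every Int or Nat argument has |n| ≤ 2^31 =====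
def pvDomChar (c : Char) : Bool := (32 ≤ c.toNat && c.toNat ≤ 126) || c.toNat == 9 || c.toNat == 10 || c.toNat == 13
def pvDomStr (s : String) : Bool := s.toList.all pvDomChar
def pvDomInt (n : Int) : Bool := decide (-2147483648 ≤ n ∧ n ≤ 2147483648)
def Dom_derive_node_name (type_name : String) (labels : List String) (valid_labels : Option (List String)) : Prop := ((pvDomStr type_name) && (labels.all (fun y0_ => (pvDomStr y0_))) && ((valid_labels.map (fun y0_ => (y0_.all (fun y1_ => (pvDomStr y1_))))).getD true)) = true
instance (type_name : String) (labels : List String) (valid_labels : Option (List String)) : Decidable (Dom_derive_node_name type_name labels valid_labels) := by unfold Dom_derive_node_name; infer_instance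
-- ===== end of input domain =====

-- B replaces A's three sequential early-return passes per label group by one single scan
-- that assigns each label a match tier (1..3) and keeps the lowest-tier label (objective: alternative).

-- ===== PORT A =====
-- String building/tests are done on List Char (PySem.Chars), the kernel-reducible side of PySem.Str.
-- the three match conditions of check_strategies (hoisted as helpers)
def pvA_c1 (tn : List Char) (l : String) : Bool :=
  PySem.Chars.isIn ('_' :: (PySem.Chars.lower l.toList ++ ['_'])) tn
def pvA_c2 (tn : List Char) (l : String) : Bool :=
  PySem.Chars.startswith tn (PySem.Chars.lower l.toList ++ ['_']) ||
  PySem.Chars.endswith tn ('_' :: PySem.Chars.lower l.toList)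
def pvA_c3 (tn : List Char) (l : String) : Bool :=
  PySem.Chars.endswith tn (PySem.Chars.lower l.toList) ||
  PySem.Chars.endswith tn (PySem.Chars.lower l.toList ++ "type".toList)

-- check_strategies: three passes (each 'for ... return' loop is List.find?, the obvious port of a first-match scan)
def pvA_check (tn : List Char) (lst : List String) : Option String :=
  match lst.find? (pvA_c1 tn) with
  | some l => some l
  | none =>
    match lst.find? (pvA_c2 tn) with
    | some l => some l
    | none => lst.find? (pvA_c3 tn)

-- 'res = …; if res: return res; <rest>'  (a string is truthy iff nonempty)
def pvA_ifTruthy (res : Option String) (rest : String) : String :=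
  match res with
  | some s => if s.toList ≠ [] then s else rest
  | none => rest

def derive_node_name (type_name : String) (labels : List String) (valid_labels : Option (List String)) : String :=
  let candidates :=
    match valid_labels with
    | none => labels
    | some vl =>
        if vl.isEmpty then labels
        else
          let intersection := labels.filter (fun l => vl.contains l)
          if intersection.isEmpty then labels else intersection
  let tn := PySem.Chars.lower type_name.toList
  let clean := candidates.filter (fun l => PySem.Str.strIsalnum l)
  let dirty := candidates.filter (fun l => !PySem.Str.strIsalnum l)
  let cleanS := PySem.List.sorted clean (fun l => PySem.Str.len l) true
  let dirtyS := PySem.List.sorted dirty (fun l => PySem.Str.len l) true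
  pvA_ifTruthy (pvA_check tn cleanS)
    (pvA_ifTruthy (pvA_check tn dirtyS)
      (match candidates with | [] => type_name | c :: _ => c))

-- ===== PORT B =====
-- tier(l): 1 middle token, 2 boundary token, 3 suffix, 4 no match
def pvB_tier (tn low : List Char) : Nat :=
  if PySem.Chars.isIn ('_' :: (low ++ ['_'])) tn then 1
  else if PySem.Chars.startswith tn (low ++ ['_']) || PySem.Chars.endswith tn ('_' :: low) then 2
  else if PySem.Chars.endswith tn low || PySem.Chars.endswith tn (low ++ "type".toList) then 3
  else 4

-- loop body of pick: keep the strictly better (lower) tier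
def pvB_step (tn : List Char) (acc : Option String × Nat) (l : String) : Option String × Nat :=
  let t := pvB_tier tn (PySem.Chars.lower l.toList)
  if t < acc.2 then (some l, t) else acc

-- pick: one scan over the length-desc-sorted labels
def pvB_pick (tn : List Char) (lst : List String) : Option String :=
  ((PySem.List.sorted lst (fun l => PySem.Str.len l) true).foldl (pvB_step tn)
    ((none : Option String), 4)).1

-- Python 'a or b' on Optional[str]
def pvB_pyOr (a b : Option String) : Option String :=
  match a with
  | some s => if s.toList ≠ [] then some s else b
  | none => b

def derive_node_name_alt (type_name : String) (labels : List String) (valid_labels : Option (List String)) : String :=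
  let candidates :=
    match valid_labels with
    | none => labels
    | some vl =>
        if vl.isEmpty then labels
        else
          let intersection := labels.filter (fun l => vl.contains l)
          if intersection.isEmpty then labels else intersection
  let tn := PySem.Chars.lower type_name.toList
  -- one partition pass: append each label to clean or dirty
  let cd := candidates.foldl
    (fun (cd : List String × List String) l =>
      if PySem.Str.strIsalnum l then (cd.1 ++ [l], cd.2) else (cd.1, cd.2 ++ [l]))
    ([], [])
  let res := pvB_pyOr (pvB_pick tn cd.1) (pvB_pick tn cd.2)
  match res with
  | some s => if s.toList ≠ [] then s else (match candidates with | [] => type_name | c :: _ => c)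
  | none => match candidates with | [] => type_name | c :: _ => c

-- ===== PRECONDITION & SPEC =====
def Spec_derive_node_name (type_name : String) (labels : List String) (valid_labels : Option (List String)) (out : String) : Prop := out = derive_node_name_alt type_name labels valid_labels
instance (type_name : String) (labels : List String) (valid_labels : Option (List String)) (out : String) : Decidable (Spec_derive_node_name type_name labels valid_labels out) := by unfold Spec_derive_node_name; infer_instance

-- ===== CLAIM (what is proved, stated in full; the proofs are below) =====
def Claim_equal_derive_node_name : Prop := ∀ (type_name : String) (labels : List String) (valid_labels : Option (List String)), Dom_derive_node_name type_name labels valid_labels → Spec_derive_node_name type_name labels valid_labels (derive_node_name type_name labels valid_labels)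

-- ===== LEMMAS AND PROOFS =====

-- tier bounds
theorem pvB_tier_pos (tn low : List Char) : 1 ≤ pvB_tier tn low := by
  unfold pvB_tier; split_ifs <;> omega

-- tier versus the three conditions
theorem pvB_tier_eq_one_iff (tn : List Char) (l : String) :
    pvB_tier tn (PySem.Chars.lower l.toList) = 1 ↔ pvA_c1 tn l = true := by
  unfold pvB_tier pvA_c1; split_ifs <;> simp_all

theorem pvB_tier_eq_two_iff (tn : List Char) (l : String) (h1 : pvA_c1 tn l = false) :
    pvB_tier tn (PySem.Chars.lower l.toList) = 2 ↔ pvA_c2 tn l = true := by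
  unfold pvB_tier; unfold pvA_c1 at h1; unfold pvA_c2; split_ifs <;> simp_all

theorem pvB_tier_eq_three_iff (tn : List Char) (l : String)
    (h1 : pvA_c1 tn l = false) (h2 : pvA_c2 tn l = false) :
    pvB_tier tn (PySem.Chars.lower l.toList) = 3 ↔ pvA_c3 tn l = true := by
  unfold pvB_tier; unfold pvA_c1 at h1; unfold pvA_c2 at h2; unfold pvA_c3
  split_ifs <;> simp_all

-- the partition fold is the pair of filters
theorem pvB_partition (p : String → Bool) (xs : List String) (a b : List String) :
    xs.foldl (fun (cd : List String × List String) l =>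
      if p l then (cd.1 ++ [l], cd.2) else (cd.1, cd.2 ++ [l])) (a, b)
    = (a ++ xs.filter p, b ++ xs.filter (fun l => !p l)) := by
  induction xs generalizing a b with
  | nil => simp
  | cons x xs ih =>
    by_cases h : p x = true <;> simp [List.foldl_cons, h, ih]

-- find? only depends on the predicate's values on the list
theorem pvFind_congr (p q : String → Bool) (l : List String)
    (h : ∀ x ∈ l, p x = q x) : l.find? p = l.find? q := by
  induction l with
  | nil => rfl
  | cons x xs ih =>
    simp only [List.find?_cons]
    rw [h x (by simp)]
    cases q x <;> simp [ih (fun y hy => h y (by simp [hy]))]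

-- once every remaining tier is ≥ the stored one, the fold is done
theorem pvB_fold_stay (tn : List Char) (S : List String) (b : Option String) (k : Nat)
    (h : ∀ l ∈ S, k ≤ pvB_tier tn (PySem.Chars.lower l.toList)) :
    S.foldl (pvB_step tn) (b, k) = (b, k) := by
  induction S with
  | nil => rfl
  | cons x xs ih =>
    have hx := h x (by simp)
    simp only [List.foldl_cons, pvB_step]
    rw [if_neg (by omega)]
    exact ih (fun l hl => h l (by simp [hl]))

-- if tier j is present and nothing smaller is, the fold returns the first element of tier j
theorem pvB_fold_found (tn : List Char) (S : List String) (b : Option String) (k j : Nat)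
    (hjk : j < k)
    (hlow : ∀ l ∈ S, j ≤ pvB_tier tn (PySem.Chars.lower l.toList))
    (hex : ∃ l ∈ S, pvB_tier tn (PySem.Chars.lower l.toList) = j) :
    (S.foldl (pvB_step tn) (b, k)).1
      = S.find? (fun l => pvB_tier tn (PySem.Chars.lower l.toList) == j) := by
  induction S generalizing b k with
  | nil => simp at hex
  | cons x xs ih =>
    simp only [List.foldl_cons, List.find?_cons]
    by_cases hx : pvB_tier tn (PySem.Chars.lower x.toList) = j
    · rw [pvB_step, if_pos (by omega)]
      simp only [hx, beq_self_eq_true]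
      rw [pvB_fold_stay tn xs (some x) j (fun l hl => hlow l (by simp [hl]))]
    · have hx' : j < pvB_tier tn (PySem.Chars.lower x.toList) := by
        have := hlow x (by simp); omega
      have hex' : ∃ l ∈ xs, pvB_tier tn (PySem.Chars.lower l.toList) = j := by
        rcases hex with ⟨l, hl, hlj⟩
        rcases List.mem_cons.mp hl with h | h
        · exact absurd (h ▸ hlj) hx
        · exact ⟨l, h, hlj⟩
      have hbeq : (pvB_tier tn (PySem.Chars.lower x.toList) == j) = false := by simp [hx]
      rw [hbeq]
      rw [pvB_step]
      split_ifs with ht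
      · exact ih (some x) _ hx' (fun l hl => hlow l (by simp [hl])) hex'
      · exact ih b k hjk (fun l hl => hlow l (by simp [hl])) hex'

-- CORE: the three sequential passes equal the single min-tier scan, on any common list S
theorem pvCheck_eq_fold (tn : List Char) (S : List String) :
    pvA_check tn S = (S.foldl (pvB_step tn) ((none : Option String), 4)).1 := by
  by_cases h1 : ∃ l ∈ S, pvA_c1 tn l = true
  · have hex : ∃ l ∈ S, pvB_tier tn (PySem.Chars.lower l.toList) = 1 := by
      rcases h1 with ⟨l, hl, hc⟩
      exact ⟨l, hl, (pvB_tier_eq_one_iff tn l).mpr hc⟩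
    have hfold := pvB_fold_found tn S none 4 1 (by omega)
      (fun l _ => pvB_tier_pos tn _) hex
    have hcongr : S.find? (fun l => pvB_tier tn (PySem.Chars.lower l.toList) == 1)
        = S.find? (pvA_c1 tn) :=
      pvFind_congr _ _ S (fun x _ => by
        cases hc : pvA_c1 tn x <;> simp [pvB_tier_eq_one_iff tn x, hc])
    rcases h1 with ⟨l, hl, hc⟩
    rcases Option.isSome_iff_exists.mp (List.find?_isSome.mpr ⟨l, hl, hc⟩) with ⟨r, hr⟩
    simp only [pvA_check, hfold, hcongr, hr]
  · have hc1 : ∀ l ∈ S, pvA_c1 tn l = false := by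
      intro x hx
      cases hx' : pvA_c1 tn x
      · rfl
      · exact absurd ⟨x, hx, hx'⟩ h1
    have hfind1 : S.find? (pvA_c1 tn) = none :=
      List.find?_eq_none.mpr (fun x hx => by simp [hc1 x hx])
    have hlow2 : ∀ l ∈ S, 2 ≤ pvB_tier tn (PySem.Chars.lower l.toList) := by
      intro l hl
      have hp := pvB_tier_pos tn (PySem.Chars.lower l.toList)
      have hne : pvB_tier tn (PySem.Chars.lower l.toList) ≠ 1 := fun h => by
        have hh := (pvB_tier_eq_one_iff tn l).mp h
        simp [hc1 l hl] at hh
      omega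
    by_cases h2 : ∃ l ∈ S, pvA_c2 tn l = true
    · have hex : ∃ l ∈ S, pvB_tier tn (PySem.Chars.lower l.toList) = 2 := by
        rcases h2 with ⟨l, hl, hc⟩
        exact ⟨l, hl, (pvB_tier_eq_two_iff tn l (hc1 l hl)).mpr hc⟩
      have hfold := pvB_fold_found tn S none 4 2 (by omega) hlow2 hex
      have hcongr : S.find? (fun l => pvB_tier tn (PySem.Chars.lower l.toList) == 2)
          = S.find? (pvA_c2 tn) :=
        pvFind_congr _ _ S (fun x hx => by
          cases hc : pvA_c2 tn x <;>
            simp [pvB_tier_eq_two_iff tn x (hc1 x hx), hc])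
      rcases h2 with ⟨l, hl, hc⟩
      rcases Option.isSome_iff_exists.mp (List.find?_isSome.mpr ⟨l, hl, hc⟩) with ⟨r, hr⟩
      simp only [pvA_check, hfind1, hfold, hcongr, hr]
    · have hc2 : ∀ l ∈ S, pvA_c2 tn l = false := by
        intro x hx
        cases hx' : pvA_c2 tn x
        · rfl
        · exact absurd ⟨x, hx, hx'⟩ h2
      have hfind2 : S.find? (pvA_c2 tn) = none :=
        List.find?_eq_none.mpr (fun x hx => by simp [hc2 x hx])
      have hlow3 : ∀ l ∈ S, 3 ≤ pvB_tier tn (PySem.Chars.lower l.toList) := by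
        intro l hl
        have hp := hlow2 l hl
        have hne : pvB_tier tn (PySem.Chars.lower l.toList) ≠ 2 := fun h => by
          have hh := (pvB_tier_eq_two_iff tn l (hc1 l hl)).mp h
          simp [hc2 l hl] at hh
        omega
      by_cases h3 : ∃ l ∈ S, pvA_c3 tn l = true
      · have hex : ∃ l ∈ S, pvB_tier tn (PySem.Chars.lower l.toList) = 3 := by
          rcases h3 with ⟨l, hl, hc⟩
          exact ⟨l, hl, (pvB_tier_eq_three_iff tn l (hc1 l hl) (hc2 l hl)).mpr hc⟩
        have hfold := pvB_fold_found tn S none 4 3 (by omega) hlow3 hex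
        have hcongr : S.find? (fun l => pvB_tier tn (PySem.Chars.lower l.toList) == 3)
            = S.find? (pvA_c3 tn) :=
          pvFind_congr _ _ S (fun x hx => by
            cases hc : pvA_c3 tn x <;>
              simp [pvB_tier_eq_three_iff tn x (hc1 x hx) (hc2 x hx), hc])
        simp only [pvA_check, hfind1, hfind2, hfold, hcongr]
      · have hc3 : ∀ l ∈ S, pvA_c3 tn l = false := by
          intro x hx
          cases hx' : pvA_c3 tn x
          · rfl
          · exact absurd ⟨x, hx, hx'⟩ h3
        have hfind3 : S.find? (pvA_c3 tn) = none :=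
          List.find?_eq_none.mpr (fun x hx => by simp [hc3 x hx])
        have hlow4 : ∀ l ∈ S, 4 ≤ pvB_tier tn (PySem.Chars.lower l.toList) := by
          intro l hl
          have hp := hlow3 l hl
          have hne : pvB_tier tn (PySem.Chars.lower l.toList) ≠ 3 := fun h => by
            have hh := (pvB_tier_eq_three_iff tn l (hc1 l hl) (hc2 l hl)).mp h
            simp [hc3 l hl] at hh
          omega
        rw [pvB_fold_stay tn S none 4 hlow4]
        simp only [pvA_check, hfind1, hfind2, hfind3]

-- pick equals check_strategies on the same (sorted) list
theorem pvPick_eq_check (tn : List Char) (lst : List String) :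
    pvB_pick tn lst = pvA_check tn (PySem.List.sorted lst (fun l => PySem.Str.len l) true) := by
  rw [pvB_pick, pvCheck_eq_fold]

-- the Option plumbing at the tail of both programs agrees
theorem pvPlumb (r1 r2 : Option String) (fb : String) :
    pvA_ifTruthy r1 (pvA_ifTruthy r2 fb)
      = (match pvB_pyOr r1 r2 with
         | some s => if s.toList ≠ [] then s else fb
         | none => fb) := by
  cases r1 with
  | none =>
    cases r2 with
    | none => rfl
    | some s => simp [pvA_ifTruthy, pvB_pyOr]
  | some s =>
    by_cases hs : s.toList = []
    · cases r2 with
      | none => simp [pvA_ifTruthy, pvB_pyOr, hs]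
      | some s2 => simp [pvA_ifTruthy, pvB_pyOr, hs]
    · simp [pvA_ifTruthy, pvB_pyOr, hs]

-- ===== VERDICT (by name: the statement is the Claim_ definition above) =====
theorem derive_node_name_spec : Claim_equal_derive_node_name := by
  intro type_name labels valid_labels _
  unfold Spec_derive_node_name derive_node_name derive_node_name_alt
  simp only [pvB_partition, List.nil_append, pvPick_eq_check, pvPlumb]
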